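-- pv_equiv track=rewrite | github.com/xcfcode/PLM_annotator | annotator/annotate.py | remove_first_word
-- ===== SOURCE A (Python) =====
-- def remove_first_word(words, losses):
--     first_words = []
--     clean_words = []
--     clean_losses = []
--
--     first_w_indices = []
--     for index, word in enumerate(words):
--         if word == "<|endoftext|>":
--             first_w_indices.append(index + 1)
--
--     for index, (word, loss) in enumerate(zip(words, losses)):
--         if word == "<|endoftext|>":
--             continue
--         if index in first_w_indices:
--             first_words.append(word)
--             continue
--
--         clean_words.append(word)
--         clean_losses.append(loss)
--     return clean_words, clean_losses, first_words
-- ===== SOURCE B (Python) =====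
-- def remove_first_word(words, losses):
--     clean_words = []
--     clean_losses = []
--     first_words = []
--     prev_was_eot = False
--     for word, loss in zip(words, losses):
--         if word == "<|endoftext|>":
--             prev_was_eot = True
--             continue
--         if prev_was_eot:
--             first_words.append(word)
--         else:
--             clean_words.append(word)
--             clean_losses.append(loss)
--         prev_was_eot = False
--     return clean_words, clean_losses, first_words
-- ===== Notes on version B (the rewrite author's own statement) =====
-- stated objective: simpler
-- what changed: Replaces the two-phase scheme (precompute an index list of positions after '<|endoftext|>' tokens, then re-scan with a linear membership test) by a single pass over zip(words, losses) carrying one boolean 'previous word was endoftext' flag.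
import Mathlib
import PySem

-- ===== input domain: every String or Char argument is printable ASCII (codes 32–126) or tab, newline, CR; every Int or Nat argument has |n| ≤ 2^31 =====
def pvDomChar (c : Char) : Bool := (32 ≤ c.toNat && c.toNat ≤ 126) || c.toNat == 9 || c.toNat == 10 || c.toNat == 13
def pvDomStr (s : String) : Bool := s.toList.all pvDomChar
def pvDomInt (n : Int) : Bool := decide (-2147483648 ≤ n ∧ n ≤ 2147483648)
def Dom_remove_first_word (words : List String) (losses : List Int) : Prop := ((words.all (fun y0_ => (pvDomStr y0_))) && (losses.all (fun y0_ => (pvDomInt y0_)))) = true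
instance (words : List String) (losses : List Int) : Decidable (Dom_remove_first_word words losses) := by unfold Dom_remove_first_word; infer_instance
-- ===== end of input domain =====

-- B replaces A's two-phase scheme (index table + re-scan with membership test) by a
-- single pass over zip(words, losses) carrying a 'previous word was endoftext' flag (objective: simpler).

-- ===== PORT A =====
-- first loop of A: builds first_w_indices from enumerate(words)
def rfw_fwi (words : List String) : List Int :=
  (PySem.List.enumerate words 0).foldl
    (fun acc p => if p.2 == "<|endoftext|>" then acc ++ [p.1 + 1] else acc) []

def remove_first_word (words : List String) (losses : List Int) : List String × List Int × List String :=
  let first_w_indices := rfw_fwi words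
  (PySem.List.enumerate (words.zip losses) 0).foldl
    (fun (acc : List String × List Int × List String) p =>
      if p.2.1 == "<|endoftext|>" then acc
      else if first_w_indices.contains p.1 then (acc.1, acc.2.1, acc.2.2 ++ [p.2.1])
      else (acc.1 ++ [p.2.1], acc.2.1 ++ [p.2.2], acc.2.2))
    ([], [], [])

-- ===== PORT B =====
def remove_first_word_alt (words : List String) (losses : List Int) : List String × List Int × List String :=
  let st := (words.zip losses).foldl
    (fun (acc : (List String × List Int × List String) × Bool) wl =>
      if wl.1 == "<|endoftext|>" then (acc.1, true)
      else if acc.2 then ((acc.1.1, acc.1.2.1, acc.1.2.2 ++ [wl.1]), false)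
      else ((acc.1.1 ++ [wl.1], acc.1.2.1 ++ [wl.2], acc.1.2.2), false))
    (([], [], []), false)
  st.1

-- ===== PRECONDITION & SPEC =====
def Spec_remove_first_word (words : List String) (losses : List Int) (out : List String × List Int × List String) : Prop := out = remove_first_word_alt words losses
instance (words : List String) (losses : List Int) (out : List String × List Int × List String) : Decidable (Spec_remove_first_word words losses out) := by unfold Spec_remove_first_word; infer_instance

-- ===== CLAIM (what is proved, stated in full; the proofs are below) =====
def Claim_equal_remove_first_word : Prop := ∀ (words : List String) (losses : List Int), Dom_remove_first_word words losses → Spec_remove_first_word words losses (remove_first_word words losses)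

-- ===== LEMMAS AND PROOFS =====

-- reference recursion: what both loops compute on the zipped list, given "previous word was eot"
def rfw_go (prev : Bool) : List (String × Int) → List String × List Int × List String
  | [] => ([], [], [])
  | (w, l) :: rest =>
    if w == "<|endoftext|>" then rfw_go true rest
    else if prev then
      let r := rfw_go false rest
      (r.1, r.2.1, w :: r.2.2)
    else
      let r := rfw_go false rest
      (w :: r.1, l :: r.2.1, r.2.2)

-- membership in A's first-word index table, characterized
lemma rfw_fwi_contains (ws : List String) (s : Nat) (acc : List Int) (i : Int) :
    (((PySem.List.enumerate ws (s : Int)).foldl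
        (fun acc p => if p.2 == "<|endoftext|>" then acc ++ [p.1 + 1] else acc) acc).contains i = true) ↔
    (acc.contains i = true ∨ ((s : Int) < i ∧ ws[(i - 1 - s).toNat]? = some "<|endoftext|>")) := by
  induction ws generalizing s acc with
  | nil => simp [PySem.List.enumerate_nil]
  | cons w rest ih =>
    rw [PySem.List.enumerate_cons]
    simp only [List.foldl_cons]
    have hsh : ((s : Int) + 1) = ((s + 1 : Nat) : Int) := by push_cast; ring
    by_cases hi : i = (s : Int) + 1
    · subst hi
      rw [hsh] at ih ⊢
      rw [ih (s + 1)]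
      by_cases hw : w = "<|endoftext|>"
      · simp [hw]
      · have hwb : (w == "<|endoftext|>") = false := by simp [hw]
        simp only [hwb]
        have h0 : (((s + 1 : Nat) : Int) - 1 - s).toNat = 0 := by push_cast; omega
        have hlt : ¬ ((s + 1 : Nat) : Int) < ((s + 1 : Nat) : Int) := lt_irrefl _
        constructor
        · rintro (h | ⟨h1, h2⟩)
          · left; exact h
          · exact absurd h1 (by push_cast at *; omega)
        · rintro (h | ⟨h1, h2⟩)
          · left; exact h
          · rw [h0] at h2; simp at h2; exact absurd h2 hw
    · rw [hsh, ih (s + 1)]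
      by_cases hw : w = "<|endoftext|>"
      · rw [hw]; simp only [beq_self_eq_true, if_true]
        rw [List.contains_append]
        simp only [Bool.or_eq_true, List.contains_cons, List.contains_nil]
        constructor
        · rintro (⟨h | h⟩ | ⟨h1, h2⟩)
          · left; exact h
          · simp at h; exact absurd h hi
          · right
            refine ⟨by push_cast at *; omega, ?_⟩
            have hpos : 0 < (i - 1 - s).toNat := by push_cast at h1 ⊢; omega
            have : (i - 1 - s).toNat = ((i - 1 - (s + 1 : Nat)).toNat) + 1 := by push_cast at h1 ⊢; omega
            rw [this]; simpa using h2
        · rintro (h | ⟨h1, h2⟩)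
          · left; left; exact h
          · by_cases his : (s : Int) + 1 < i
            · right
              refine ⟨by push_cast; omega, ?_⟩
              have : (i - 1 - s).toNat = ((i - 1 - (s + 1 : Nat)).toNat) + 1 := by push_cast at his ⊢; omega
              rw [this] at h2; simpa using h2
            · have : i = (s : Int) + 1 := by omega
              exact absurd this hi
      · have hwb : ¬ (w == "<|endoftext|>") = true := by simp [hw]
        simp only [if_neg hwb]
        constructor
        · rintro (h | ⟨h1, h2⟩)
          · left; exact h
          · right
            refine ⟨by push_cast at *; omega, ?_⟩
            have : (i - 1 - s).toNat = ((i - 1 - (s + 1 : Nat)).toNat) + 1 := by push_cast at h1 ⊢; omega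
            rw [this]; simpa using h2
        · rintro (h | ⟨h1, h2⟩)
          · left; exact h
          · by_cases his : (s : Int) + 1 < i
            · right
              refine ⟨by push_cast; omega, ?_⟩
              have : (i - 1 - s).toNat = ((i - 1 - (s + 1 : Nat)).toNat) + 1 := by push_cast at his ⊢; omega
              rw [this] at h2; simpa using h2
            · have hie : i = (s : Int) + 1 := by omega
              have h0 : (i - 1 - s).toNat = 0 := by omega
              rw [h0] at h2; simp at h2; exact absurd h2 hw

-- A's second loop computes rfw_go, given the membership facts about the index table
lemma rfw_A_loop (f : List Int) :
    ∀ (pairs : List (String × Int)) (s : Nat) (prev : Bool)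
      (acc : List String × List Int × List String),
      f.contains (s : Int) = prev →
      (∀ k (hk : k < pairs.length), f.contains ((s + 1 + k : Nat) : Int) = (pairs[k].1 == "<|endoftext|>")) →
      (PySem.List.enumerate pairs (s : Int)).foldl
        (fun (acc : List String × List Int × List String) p =>
          if p.2.1 == "<|endoftext|>" then acc
          else if f.contains p.1 then (acc.1, acc.2.1, acc.2.2 ++ [p.2.1])
          else (acc.1 ++ [p.2.1], acc.2.1 ++ [p.2.2], acc.2.2)) acc =
      (acc.1 ++ (rfw_go prev pairs).1, acc.2.1 ++ (rfw_go prev pairs).2.1,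
        acc.2.2 ++ (rfw_go prev pairs).2.2) := by
  intro pairs
  induction pairs with
  | nil => intro s prev acc _ _; simp [PySem.List.enumerate_nil, rfw_go]
  | cons wl rest ih =>
    intro s prev acc h0 hk
    obtain ⟨w, l⟩ := wl
    rw [PySem.List.enumerate_cons]
    simp only [List.foldl_cons]
    have hsh : ((s : Int) + 1) = ((s + 1 : Nat) : Int) := by push_cast; ring
    have hnext : f.contains ((s + 1 : Nat) : Int) = (w == "<|endoftext|>") := by
      have := hk 0 (by simp)
      simpa using this
    have hrest : ∀ k (hk' : k < rest.length),
        f.contains ((s + 1 + 1 + k : Nat) : Int) = (rest[k].1 == "<|endoftext|>") := by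
      intro k hk'
      have := hk (k + 1) (by simp; omega)
      have harg : (s + 1 + (k + 1) : Nat) = (s + 1 + 1 + k : Nat) := by omega
      rw [harg] at this
      simpa using this
    by_cases hw : w = "<|endoftext|>"
    · rw [hw]; simp only [beq_self_eq_true, if_true]
      rw [hsh, ih (s + 1) true acc (by rw [hnext]; simp [hw]) hrest]
      simp [rfw_go]
    · have hwb : ¬ (w == "<|endoftext|>") = true := by simp [hw]
      simp only [if_neg hwb, h0]
      cases prev with
      | true =>
        rw [hsh, ih (s + 1) false _ (by rw [hnext]; simp [hw]) hrest]
        simp [rfw_go, hwb]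
      | false =>
        rw [hsh, ih (s + 1) false _ (by rw [hnext]; simp [hw]) hrest]
        simp [rfw_go, hwb]

-- the final flag of B's fold
def rfw_flag (prev : Bool) (pairs : List (String × Int)) : Bool :=
  pairs.foldl (fun _ wl => wl.1 == "<|endoftext|>") prev

-- B's fold computes rfw_go (plus the flag)
lemma rfw_B_loop :
    ∀ (pairs : List (String × Int)) (acc : List String × List Int × List String) (prev : Bool),
      pairs.foldl
        (fun (acc : (List String × List Int × List String) × Bool) wl =>
          if wl.1 == "<|endoftext|>" then (acc.1, true)
          else if acc.2 then ((acc.1.1, acc.1.2.1, acc.1.2.2 ++ [wl.1]), false)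
          else ((acc.1.1 ++ [wl.1], acc.1.2.1 ++ [wl.2], acc.1.2.2), false)) (acc, prev) =
      ((acc.1 ++ (rfw_go prev pairs).1, acc.2.1 ++ (rfw_go prev pairs).2.1,
        acc.2.2 ++ (rfw_go prev pairs).2.2), rfw_flag prev pairs) := by
  intro pairs
  induction pairs with
  | nil => intro acc prev; simp [rfw_go, rfw_flag]
  | cons wl rest ih =>
    intro acc prev
    obtain ⟨w, l⟩ := wl
    simp only [List.foldl_cons]
    by_cases hw : w = "<|endoftext|>"
    · rw [hw]; simp only [beq_self_eq_true, if_true]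
      rw [ih]
      simp [rfw_go, rfw_flag]
    · have hwb : ¬ (w == "<|endoftext|>") = true := by simp [hw]
      simp only [if_neg hwb]
      cases prev with
      | true => rw [ih]; simp [rfw_go, rfw_flag, hwb]
      | false => rw [ih]; simp [rfw_go, rfw_flag, hwb]

lemma rfw_fwi_fact (words : List String) (losses : List Int) (k : Nat)
    (hk : k < (words.zip losses).length) :
    (rfw_fwi words).contains ((0 + 1 + k : Nat) : Int) = ((words.zip losses)[k].1 == "<|endoftext|>") := by
  have hkw : k < words.length := by
    rw [List.length_zip] at hk; omega
  have hget : (words.zip losses)[k].1 = words[k] := by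
    rw [List.getElem_zip]
  rw [hget]
  have hchar := rfw_fwi_contains words 0 [] ((0 + 1 + k : Nat) : Int)
  unfold rfw_fwi
  rw [Bool.eq_iff_iff]
  simp only [Nat.cast_zero] at hchar
  rw [hchar]
  have h1 : (((0 + 1 + k : Nat) : Int) - 1 - 0).toNat = k := by push_cast; omega
  rw [h1]
  have hg : words[k]? = some words[k] := List.getElem?_eq_getElem hkw
  rw [hg]
  constructor
  · rintro (h | ⟨_, h⟩)
    · simp at h
    · simp at h; simp [h]
  · intro h
    right
    refine ⟨by push_cast; omega, ?_⟩
    simp at h; simp [h]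

lemma rfw_fwi_zero (words : List String) : (rfw_fwi words).contains ((0 : Nat) : Int) = false := by
  have hchar := rfw_fwi_contains words 0 [] ((0 : Nat) : Int)
  unfold rfw_fwi
  by_contra h
  rw [Bool.not_eq_false] at h
  rw [show ((0:Nat) : Int) = (0 : Int) by simp] at hchar h
  rw [hchar] at h
  rcases h with h | ⟨h1, _⟩
  · simp at h
  · omega

-- ===== VERDICT (by name: the statement is the Claim_ definition above) =====
theorem remove_first_word_spec : Claim_equal_remove_first_word := by
  intro words losses _
  unfold Spec_remove_first_word remove_first_word remove_first_word_alt
  rw [show (0 : Int) = ((0 : Nat) : Int) by simp]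
  rw [rfw_A_loop (rfw_fwi words) (words.zip losses) 0 false ([], [], [])
        (rfw_fwi_zero words) (rfw_fwi_fact words losses)]
  rw [rfw_B_loop (words.zip losses) ([], [], []) false]
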